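-- pv_equiv track=rewrite | github.com/dopplershift/advent-of-code | 2015/day3.py | get_houses
-- ===== SOURCE A (Python) =====
-- def get_houses(dirs):
--     x, y = 0, 0
--     houses = {(x, y)}
--     for d in dirs:
--         if d == '>':
--             x += 1
--         elif d == '<':
--             x -= 1
--         elif d == '^':
--             y += 1
--         elif d == 'v':
--             y -= 1
--         houses.add((x, y))
--     return houses
-- ===== SOURCE B (Python) =====
-- def _psums(deltas):
--     out = [0]
--     for d in deltas:
--         out.append(out[-1] + d)
--     return out
--
-- def get_houses(dirs):
--     xs = _psums(1 if d == '>' else -1 if d == '<' else 0 for d in dirs)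
--     ys = _psums(1 if d == '^' else -1 if d == 'v' else 0 for d in dirs)
--     return set(zip(xs, ys))
-- ===== Notes on version B (the rewrite author's own statement) =====
-- stated objective: alternative
-- what changed: Instead of walking a mutable position and inserting into a set per step, B decomposes the problem into independent x and y delta streams, computes each coordinate's prefix sums in separate passes, zips them into the position sequence and deduplicates once.
import Mathlib
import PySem

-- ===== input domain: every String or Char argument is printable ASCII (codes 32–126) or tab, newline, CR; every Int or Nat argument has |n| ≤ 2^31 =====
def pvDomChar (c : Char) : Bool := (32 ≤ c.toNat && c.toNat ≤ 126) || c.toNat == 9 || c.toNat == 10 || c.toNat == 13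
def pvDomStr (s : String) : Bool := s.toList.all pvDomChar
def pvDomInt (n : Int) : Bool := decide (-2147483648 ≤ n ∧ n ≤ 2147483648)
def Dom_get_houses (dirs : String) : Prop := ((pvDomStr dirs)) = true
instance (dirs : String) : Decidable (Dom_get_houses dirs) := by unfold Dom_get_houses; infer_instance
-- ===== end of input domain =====

-- B replaces A's walk-and-mutate set loop by two independent per-coordinate prefix-sum passes zipped into the position sequence and deduplicated once (alternative decomposition; same cost).

-- ===== PORT A =====
-- step of A's loop body: move (x,y) by the matched direction, add to the set
def get_houses_step (s : (Int × Int) × PySem.Set (Int × Int)) (d : Char) :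
    (Int × Int) × PySem.Set (Int × Int) :=
  let x := s.1.1
  let y := s.1.2
  let (x, y) :=
    if d = '>' then (x + 1, y)
    else if d = '<' then (x - 1, y)
    else if d = '^' then (x, y + 1)
    else if d = 'v' then (x, y - 1)
    else (x, y)
  ((x, y), PySem.Set.add s.2 (x, y))

def get_houses (dirs : String) : List (Int × Int) :=
  (dirs.toList.foldl get_houses_step (((0 : Int), (0 : Int)), PySem.Set.ofList [((0 : Int), (0 : Int))])).2

-- ===== PORT B =====
-- helper _psums: running prefix sums of a delta stream, seeded with 0 (out[-1] ported as getLastD 0; out is never empty)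
def get_houses_psums (ds : List Int) : List Int :=
  ds.foldl (fun out d => out ++ [out.getLastD 0 + d]) [(0 : Int)]

def get_houses_dx (d : Char) : Int := if d = '>' then 1 else if d = '<' then -1 else 0
def get_houses_dy (d : Char) : Int := if d = '^' then 1 else if d = 'v' then -1 else 0

def get_houses_alt (dirs : String) : List (Int × Int) :=
  PySem.Set.ofList
    (List.zip (get_houses_psums (dirs.toList.map get_houses_dx))
              (get_houses_psums (dirs.toList.map get_houses_dy)))

-- ===== PRECONDITION & SPEC =====
def Spec_get_houses (dirs : String) (out : List (Int × Int)) : Prop := out = get_houses_alt dirs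
instance (dirs : String) (out : List (Int × Int)) : Decidable (Spec_get_houses dirs out) := by unfold Spec_get_houses; infer_instance

-- ===== CLAIM (what is proved, stated in full; the proofs are below) =====
def Claim_equal_get_houses : Prop := ∀ (dirs : String), Dom_get_houses dirs → Spec_get_houses dirs (get_houses dirs)

-- ===== LEMMAS AND PROOFS =====

-- the positions after each step of A's walk, starting from p (proof-only abstraction)
def pvTpos : List Char → Int × Int → List (Int × Int)
  | [], _ => []
  | c :: cs, p =>
      let q := (p.1 + get_houses_dx c, p.2 + get_houses_dy c)
      q :: pvTpos cs q

-- the running sums of a delta list continued from a (proof-only abstraction of _psums' tail)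
def pvSc : Int → List Int → List Int
  | _, [] => []
  | a, d :: ds => (a + d) :: pvSc (a + d) ds

-- A's if-chain moves the position by exactly the (dx, dy) pair
theorem get_houses_step_pos (p : Int × Int) (s : PySem.Set (Int × Int)) (c : Char) :
    (get_houses_step (p, s) c).1 = (p.1 + get_houses_dx c, p.2 + get_houses_dy c) := by
  unfold get_houses_step get_houses_dx get_houses_dy
  split_ifs with h1 h2 h3 h4 <;>
    simp_all [sub_eq_add_neg]

theorem get_houses_step_set (p : Int × Int) (s : PySem.Set (Int × Int)) (c : Char) :
    (get_houses_step (p, s) c).2 = PySem.Set.add s (get_houses_step (p, s) c).1 := by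
  unfold get_houses_step
  split_ifs <;> rfl

-- invariant for A's fold: the set is ofList of the initial list extended by the walk positions
theorem get_houses_fold_set (cs : List Char) (p : Int × Int) (l : List (Int × Int)) :
    (cs.foldl get_houses_step (p, PySem.Set.ofList l)).2 =
      PySem.Set.ofList (l ++ pvTpos cs p) := by
  induction cs generalizing p l with
  | nil => simp [pvTpos]
  | cons c cs ih =>
      simp only [List.foldl_cons]
      have hpos := get_houses_step_pos p (PySem.Set.ofList l) c
      have hstep : get_houses_step (p, PySem.Set.ofList l) c =
          ((p.1 + get_houses_dx c, p.2 + get_houses_dy c),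
            PySem.Set.ofList (l ++ [(p.1 + get_houses_dx c, p.2 + get_houses_dy c)])) := by
        rw [Prod.ext_iff]
        refine ⟨hpos, ?_⟩
        rw [get_houses_step_set, hpos]
        simp [PySem.Set.ofList_eq_foldl]
      rw [hstep, ih]
      simp [pvTpos, List.append_assoc]

-- B's _psums fold characterised by pvSc
theorem get_houses_psums_fold (ds : List Int) (l : List Int) (a : Int) :
    ds.foldl (fun out d => out ++ [out.getLastD 0 + d]) (l ++ [a]) =
      (l ++ [a]) ++ pvSc a ds := by
  induction ds generalizing l a with
  | nil => simp [pvSc]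
  | cons d ds ih =>
      simp only [List.foldl_cons]
      have hl : (l ++ [a]).getLastD 0 = a := by simp
      rw [hl]
      have := ih (l ++ [a]) (a + d)
      rw [List.append_assoc] at this ⊢
      rw [this]
      simp [pvSc]

theorem get_houses_psums_eq (ds : List Int) :
    get_houses_psums ds = 0 :: pvSc 0 ds := by
  have := get_houses_psums_fold ds [] 0
  simpa [get_houses_psums] using this

-- zipping the two coordinate running-sum streams gives exactly A's walk positions
theorem zip_sc_eq_tpos (cs : List Char) (x y : Int) :
    List.zip (pvSc x (cs.map get_houses_dx)) (pvSc y (cs.map get_houses_dy)) =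
      pvTpos cs (x, y) := by
  induction cs generalizing x y with
  | nil => simp [pvSc, pvTpos]
  | cons c cs ih =>
      simp only [List.map_cons, pvSc, pvTpos, List.zip_cons_cons]
      exact congrArg _ (ih _ _)

-- ===== VERDICT (by name: the statement is the Claim_ definition above) =====
theorem get_houses_spec : Claim_equal_get_houses := by
  intro dirs _
  show get_houses dirs = get_houses_alt dirs
  unfold get_houses get_houses_alt
  rw [get_houses_fold_set dirs.toList (0, 0) [(0, 0)],
      get_houses_psums_eq, get_houses_psums_eq, List.zip_cons_cons,
      zip_sc_eq_tpos]
  rfl
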